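-- pv_equiv track=rewrite | github.com/simple1007/SemiMRC | ht_pre.py | token
-- ===== SOURCE A (Python) =====
-- def token(x):
--     x = x.split()
--
--     result = []
--     for xx in x:
--         xx = xx.split('+')
--         temp = []
--         for xxx in xx:
--             temp.append(xxx.split('/')[0])
--         temp = '+'.join(temp)
--         result.append(temp)
--
--     return ' '.join(result)
-- ===== SOURCE B (Python) =====
-- def token(x):
--     # Single char-scan per whitespace token: copy chars, and after a '/'
--     # stop copying until the next '+' (which is kept). This replaces A's
--     # split('+') / split('/')[0] / '+'.join decomposition.
--     out = []
--     for t in x.split():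
--         keep = True
--         buf = []
--         for c in t:
--             if c == '+':
--                 keep = True
--                 buf.append(c)
--             elif c == '/':
--                 keep = False
--             elif keep:
--                 buf.append(c)
--         out.append(''.join(buf))
--     return ' '.join(out)
-- ===== Notes on version B (the rewrite author's own statement) =====
-- stated objective: simpler
-- what changed: Replaces the nested split('+')/split('/')[0]/'+'.join passes with one left-to-right character scan per whitespace token that drops characters between a '/' and the next '+'.
import Mathlib
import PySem

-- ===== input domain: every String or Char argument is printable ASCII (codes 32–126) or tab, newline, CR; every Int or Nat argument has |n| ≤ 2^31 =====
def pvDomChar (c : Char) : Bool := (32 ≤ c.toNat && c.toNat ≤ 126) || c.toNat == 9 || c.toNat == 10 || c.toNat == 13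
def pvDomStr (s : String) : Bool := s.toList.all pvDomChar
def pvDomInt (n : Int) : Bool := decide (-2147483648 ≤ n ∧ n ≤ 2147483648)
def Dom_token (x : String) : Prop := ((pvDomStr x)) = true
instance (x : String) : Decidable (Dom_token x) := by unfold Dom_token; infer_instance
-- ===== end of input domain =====

-- B replaces A's nested split('+')/split('/')[0]/'+'.join passes with one character scan
-- per whitespace token (objective: simpler); same return value on every input.

-- ===== PORT A =====
def token (x : String) : String :=
  let words := PySem.Chars.split₀ x.toList
  let result := words.foldl (fun result xx =>
    let segs := PySem.Chars.splitOn xx ['+']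
    let temp := segs.foldl (fun temp xxx =>
      -- xxx.split('/')[0]: split('/') is never empty, so index 0 never raises
      temp ++ [(PySem.List.pyGet? (PySem.Chars.splitOn xxx ['/']) 0).getD []]) []
    result ++ [PySem.Chars.join ['+'] temp]) []
  String.ofList (PySem.Chars.join [' '] result)

-- ===== PORT B =====
-- the body of Source B's inner character loop, as a named step function
def stepB (st : Bool × List Char) (c : Char) : Bool × List Char :=
  if c = '+' then (true, st.2 ++ [c])
  else if c = '/' then (false, st.2)
  else if st.1 then (st.1, st.2 ++ [c]) else (st.1, st.2)

def token_alt (x : String) : String :=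
  let out := (PySem.Chars.split₀ x.toList).foldl (fun out t =>
    out ++ [(t.foldl stepB (true, [])).2]) []
  String.ofList (PySem.Chars.join [' '] out)

-- ===== PRECONDITION & SPEC =====
def Spec_token (x : String) (out : String) : Prop := out = token_alt x
instance (x : String) (out : String) : Decidable (Spec_token x out) := by unfold Spec_token; infer_instance

-- ===== CLAIM (what is proved, stated in full; the proofs are below) =====
def Claim_equal_token : Prop := ∀ (x : String), Dom_token x → Spec_token x (token x)

-- ===== LEMMAS AND PROOFS =====

-- splitting on a single separator character, in direct-recursion form
def splitSingle (sep : Char) : List Char → List (List Char)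
  | [] => [[]]
  | c :: cs => if c = sep then [] :: splitSingle sep cs
               else (splitSingle sep cs).modifyHead (c :: ·)

-- Source B's scan, in direct-recursion form (keep = the copying flag)
def scanB (keep : Bool) : List Char → List Char
  | [] => []
  | c :: cs =>
      if c = '+' then '+' :: scanB true cs
      else if c = '/' then scanB false cs
      else if keep then c :: scanB keep cs else scanB keep cs

def takeW (s : List Char) : List Char := s.takeWhile (· != '/')

def joinTail : List (List Char) → List Char
  | [] => []
  | x :: xs => '+' :: PySem.Chars.join ['+'] (x :: xs)

theorem splitSingle_ne_nil (sep : Char) (s : List Char) : splitSingle sep s ≠ [] := by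
  cases s with
  | nil => simp [splitSingle]
  | cons c cs =>
      simp only [splitSingle]
      split
      · simp
      · cases h : splitSingle sep cs with
        | nil => exact absurd h (splitSingle_ne_nil sep cs)
        | cons y ys => simp

theorem foldl_push {α β : Type} (f : α → β) (l : List α) (init : List β) :
    l.foldl (fun acc a => acc ++ [f a]) init = init ++ l.map f := by
  induction l generalizing init with
  | nil => simp
  | cons a l ih => simp [List.foldl_cons, ih, List.append_assoc]

theorem splitOn_go_single (sep : Char) (l : List Char) :
    ∀ (fuel : Nat) (cur : List Char) (acc : List (List Char)), l.length ≤ fuel →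
      PySem.Chars.splitOn.go [sep] fuel l cur acc
        = acc.reverse ++ (splitSingle sep l).modifyHead (cur.reverse ++ ·) := by
  induction l with
  | nil =>
      intro fuel cur acc _
      cases fuel <;> simp [PySem.Chars.splitOn.go, splitSingle]
  | cons c rest ih =>
      intro fuel cur acc hf
      cases fuel with
      | zero => simp at hf
      | succ f =>
          simp only [PySem.Chars.splitOn.go, List.isPrefixOf]
          by_cases hc : c = sep
          · subst hc
            simp only [BEq.rfl, Bool.true_and, List.isPrefixOf_nil_left, if_pos]
            have hd : List.drop (List.length [c]) (c :: rest) = rest := rfl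
            rw [hd, ih f [] (cur.reverse :: acc) (by simpa using Nat.lt_succ_iff.mp (by simpa using hf))]
            simp only [splitSingle, if_pos rfl, List.modifyHead, List.reverse_cons,
              List.append_assoc, List.reverse_nil, List.nil_append, List.singleton_append]
            cases hs : splitSingle c rest <;> simp
          · have hb : (sep == c && true) = false := by simp [BEq.comm]; exact fun h => hc h.symm
            simp only [List.isPrefixOf_nil_left, Bool.and_true, hb, if_neg, Bool.false_eq_true,
              not_false_iff]
            rw [ih f (c :: cur) acc (by simpa using Nat.lt_succ_iff.mp (by simpa using hf))]
            simp only [splitSingle, if_neg hc]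
            cases h : splitSingle sep rest with
            | nil => exact absurd h (splitSingle_ne_nil sep rest)
            | cons y ys => simp

theorem splitOn_single (sep : Char) (l : List Char) :
    PySem.Chars.splitOn l [sep] = splitSingle sep l := by
  unfold PySem.Chars.splitOn
  rw [splitOn_go_single sep l (l.length + 1) [] [] (Nat.le_succ _)]
  cases h : splitSingle sep l with
  | nil => exact absurd h (splitSingle_ne_nil sep l)
  | cons y ys => simp

theorem head_splitSingle (sep : Char) (s : List Char) :
    (splitSingle sep s).headD [] = s.takeWhile (· != sep) := by
  induction s with
  | nil => simp [splitSingle]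
  | cons c cs ih =>
      simp only [splitSingle]
      by_cases hc : c = sep
      · simp [hc]
      · rw [if_neg hc]
        cases h : splitSingle sep cs with
        | nil => exact absurd h (splitSingle_ne_nil sep cs)
        | cons y ys =>
            rw [h] at ih
            simp only [List.modifyHead, List.headD, List.takeWhile]
            simp only [List.headD] at ih
            simp [show (c != sep) = true by simpa using hc, ih]

theorem segA_eq_takeW (s : List Char) :
    (PySem.List.pyGet? (PySem.Chars.splitOn s ['/']) 0).getD [] = takeW s := by
  rw [splitOn_single]
  cases h : splitSingle '/' s with
  | nil => exact absurd h (splitSingle_ne_nil '/' s)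
  | cons y ys =>
      have := head_splitSingle '/' s
      rw [h] at this
      simpa [PySem.List.pyGet?, PySem.List.pyIdx?, takeW] using this

theorem foldl_stepB (cs : List Char) :
    ∀ (keep : Bool) (buf : List Char),
      (cs.foldl stepB (keep, buf)).2 = buf ++ scanB keep cs := by
  induction cs with
  | nil => intro keep buf; simp [scanB]
  | cons c cs ih =>
      intro keep buf
      simp only [List.foldl_cons, stepB, scanB]
      by_cases h1 : c = '+'
      · simp [h1, ih, List.append_assoc]
      · rw [if_neg h1, if_neg h1]
        by_cases h2 : c = '/'
        · simp [h2, ih]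
        · rw [if_neg h2, if_neg h2]
          cases keep <;> simp [ih, List.append_assoc]

theorem takeW_cons_ne (c : Char) (y : List Char) (h : ¬ c = '/') :
    takeW (c :: y) = c :: takeW y := by
  simp [takeW, List.takeWhile, show (c != '/') = true by simpa using h]

theorem scanB_eq (cs : List Char) :
    scanB true cs = PySem.Chars.join ['+'] ((splitSingle '+' cs).map takeW) ∧
    scanB false cs = joinTail ((splitSingle '+' cs).tail.map takeW) := by
  induction cs with
  | nil =>
      simp [scanB, splitSingle, joinTail, PySem.Chars.join_singleton, takeW]
  | cons c cs ih =>
      obtain ⟨ihP, ihQ⟩ := ih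
      cases h : splitSingle '+' cs with
      | nil => exact absurd h (splitSingle_ne_nil '+' cs)
      | cons y ys =>
          rw [h] at ihP ihQ
          by_cases h1 : c = '+'
          · subst h1
            constructor
            · simp [scanB, splitSingle, ihP, h, takeW, PySem.Chars.join_cons_cons]
            · simp [scanB, splitSingle, ihP, h, joinTail, takeW,
                PySem.Chars.join_cons_cons]
          · by_cases h2 : c = '/'
            · subst h2
              have hne : ¬ ('/' : Char) = '+' := by decide
              constructor
              · simp only [scanB, if_neg hne, if_pos rfl, ihQ, splitSingle, h,
                  List.modifyHead, List.map_cons, List.tail_cons]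
                have ht : takeW ('/' :: y) = [] := by simp [takeW, List.takeWhile]
                rw [ht]
                cases ys with
                | nil => simp [joinTail, PySem.Chars.join_singleton]
                | cons z zs =>
                    simp [joinTail, PySem.Chars.join_cons_cons, List.map_cons]
              · simp only [scanB, if_neg hne, if_pos rfl, ihQ, splitSingle, h,
                  List.modifyHead, List.map_cons, List.tail_cons]
                simp
            · constructor
              · simp only [scanB, if_neg h1, if_neg h2, if_pos rfl, ihP, splitSingle, h,
                  List.modifyHead, List.map_cons, takeW_cons_ne c y h2]
                cases ys with
                | nil => simp [PySem.Chars.join_singleton]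
                | cons z zs =>
                    simp [PySem.Chars.join_cons_cons, List.map_cons]
              · simp only [scanB, if_neg h1, if_neg h2, Bool.false_eq_true, if_neg,
                  ihQ, splitSingle, h, List.modifyHead, List.map_cons, List.tail_cons]
                simp [ihQ]

theorem word_eq (t : List Char) :
    PySem.Chars.join ['+']
      ((PySem.Chars.splitOn t ['+']).map (fun xxx =>
        (PySem.List.pyGet? (PySem.Chars.splitOn xxx ['/']) 0).getD []))
    = (t.foldl stepB (true, [])).2 := by
  rw [foldl_stepB, splitOn_single]
  simp only [List.nil_append]
  rw [(scanB_eq t).1]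
  exact congrArg _ (List.map_congr_left fun s _ => segA_eq_takeW s)

theorem token_eq (x : String) : token x = token_alt x := by
  unfold token token_alt
  simp only [foldl_push, List.nil_append]
  exact congrArg (fun l => String.ofList (PySem.Chars.join [' '] l))
    (List.map_congr_left fun t _ => word_eq t)

-- ===== VERDICT (by name: the statement is the Claim_ definition above) =====
theorem token_spec : Claim_equal_token := by
  intro x _
  unfold Spec_token
  exact token_eq x
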